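-- pv_equiv track=rewrite | github.com/smallfishxz/Practice_Algorithm | Focus/remove_zeros.py | remove_zeros_statble
-- ===== SOURCE A (Python) =====
-- def remove_zeros_statble(A):
--   slow = 0
--   size = len(A)
--   for fast in range(size):
--     if A[fast] != 0:
--       if slow != fast:
--         A[slow] = A[fast]
--       slow += 1
--   return slow
-- ===== SOURCE B (Python) =====
-- def remove_zeros_statble(A):
--     vals = [x for x in A if x != 0]
--     for i, v in enumerate(vals):
--         A[i] = v
--     return len(vals)
-- ===== Notes on version B (the rewrite author's own statement) =====
-- stated objective: idiomatic
-- what changed: Replaces the two-pointer in-place compaction with a two-pass decomposition: first collect the non-zero elements with a comprehension, then overwrite the front of A with them, returning their count.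
import Mathlib
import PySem

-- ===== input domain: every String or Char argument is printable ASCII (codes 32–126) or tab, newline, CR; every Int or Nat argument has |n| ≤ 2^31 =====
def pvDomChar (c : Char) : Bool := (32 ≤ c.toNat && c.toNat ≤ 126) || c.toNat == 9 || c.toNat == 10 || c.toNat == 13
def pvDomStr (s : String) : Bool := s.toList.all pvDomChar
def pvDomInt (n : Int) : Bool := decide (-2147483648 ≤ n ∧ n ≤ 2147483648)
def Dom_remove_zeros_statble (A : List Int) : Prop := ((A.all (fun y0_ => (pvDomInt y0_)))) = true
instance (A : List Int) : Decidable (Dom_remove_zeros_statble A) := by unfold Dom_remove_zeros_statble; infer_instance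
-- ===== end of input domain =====

-- B replaces A's single-pass two-pointer compaction by a two-pass decomposition (collect the
-- non-zero values, then write them over the front); equivalence is about the RETURN value only,
-- though both Pythons in fact leave the argument list in the same state.

-- ===== PORT A =====
-- the indices fast and slow are always in range (slow ≤ fast < len), so pyGetD/pySetD are exact here
def remove_zeros_statble (A : List Int) : Int :=
  let size : Int := A.length
  let st := (PySem.List.pyRange 0 size 1).foldl
    (fun (s : List Int × Int) fast =>
      if PySem.List.pyGetD s.1 fast 0 ≠ 0 then
        (if s.2 ≠ fast then PySem.List.pySetD s.1 s.2 (PySem.List.pyGetD s.1 fast 0) else s.1,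
         s.2 + 1)
      else s)
    (A, 0)
  st.2

-- ===== PORT B =====
def remove_zeros_statble_alt (A : List Int) : Int :=
  let vals := A.filter (fun x => x ≠ 0)
  -- write-back pass 'for i, v in enumerate(vals): A[i] = v' — pure mutation, return value unaffected
  let _A' := (PySem.List.enumerate vals).foldl (fun (arr : List Int) p => PySem.List.pySetD arr p.1 p.2) A
  (vals.length : Int)

-- ===== PRECONDITION & SPEC =====
def Spec_remove_zeros_statble (A : List Int) (out : Int) : Prop := out = remove_zeros_statble_alt A
instance (A : List Int) (out : Int) : Decidable (Spec_remove_zeros_statble A out) := by unfold Spec_remove_zeros_statble; infer_instance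

-- ===== CLAIM (what is proved, stated in full; the proofs are below) =====
def Claim_equal_remove_zeros_statble : Prop := ∀ (A : List Int), Dom_remove_zeros_statble A → Spec_remove_zeros_statble A (remove_zeros_statble A)

-- ===== LEMMAS AND PROOFS =====

-- the loop body of A's port, named for the proofs
def pvStepA (s : List Int × Int) (fast : Int) : List Int × Int :=
  if PySem.List.pyGetD s.1 fast 0 ≠ 0 then
    (if s.2 ≠ fast then PySem.List.pySetD s.1 s.2 (PySem.List.pyGetD s.1 fast 0) else s.1,
     s.2 + 1)
  else s

theorem pvStepA_eq (s : List Int × Int) (fast : Int) :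
    (fun (s : List Int × Int) fast =>
      if PySem.List.pyGetD s.1 fast 0 ≠ 0 then
        (if s.2 ≠ fast then PySem.List.pySetD s.1 s.2 (PySem.List.pyGetD s.1 fast 0) else s.1,
         s.2 + 1)
      else s) s fast = pvStepA s fast := rfl

-- loop invariant: after processing the first n indices, the list still agrees with A from
-- index n on (and has the same length), and slow counts the non-zeros among the first n
theorem pvInvA (A : List Int) (n : Nat) (hn : n ≤ A.length) :
    (((PySem.List.pyRange 0 n 1).foldl pvStepA (A, 0)).1.length = A.length) ∧
    (((PySem.List.pyRange 0 n 1).foldl pvStepA (A, 0)).1.drop n = A.drop n) ∧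
    (((PySem.List.pyRange 0 n 1).foldl pvStepA (A, 0)).2
        = (((A.take n).filter (fun x => x ≠ 0)).length : Int)) := by
  induction n with
  | zero => simp [PySem.List.pyRange_one_eq_nil]
  | succ n ih =>
    obtain ⟨hlen, hdrop, hslow⟩ := ih (Nat.le_of_succ_le hn)
    have hnlt : n < A.length := hn
    have hrange : PySem.List.pyRange 0 (↑(n+1)) 1
        = PySem.List.pyRange 0 (↑n) 1 ++ [(n : Int)] := by
      push_cast
      exact PySem.List.pyRange_one_succ_right (by positivity)
    set st := (PySem.List.pyRange 0 (↑n) 1).foldl pvStepA (A, 0) with hst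
    have hfold : (PySem.List.pyRange 0 (↑(n+1)) 1).foldl pvStepA (A, 0) = pvStepA st n := by
      rw [hrange, List.foldl_append]; rfl
    -- the value read at index n is A[n]
    have hnst : n < st.1.length := hlen ▸ hnlt
    have hget : PySem.List.pyGetD st.1 (n : Int) 0 = A[n] := by
      rw [PySem.List.pyGetD_natCast, List.getD_eq_getElem _ _ hnst]
      have := congrArg (fun l => l[0]?) hdrop
      simp only [List.getElem?_drop, Nat.add_zero] at this
      have h1 : st.1[n]? = some st.1[n] := List.getElem?_eq_getElem hnst
      have h2 : A[n]? = some A[n] := List.getElem?_eq_getElem hnlt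
      rw [h1, h2] at this; exact Option.some.inj this
    -- slow ≤ n
    have hslow_le : st.2 ≤ (n : Int) := by
      rw [hslow]
      have := List.length_filter_le (fun x => decide (x ≠ 0)) (A.take n)
      simp only [List.length_take] at this
      omega
    have htake : A.take (n+1) = A.take n ++ [A[n]] := by
      rw [List.take_add_one, List.getElem?_eq_getElem hnlt]; rfl
    have hd1 : A.drop (n+1) = (A.drop n).tail := by simp [List.tail_drop]
    rw [hfold]
    unfold pvStepA
    rw [hget]
    by_cases hz : A[n] = 0
    · rw [if_neg (not_not_intro hz)]
      refine ⟨hlen, ?_, ?_⟩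
      · rw [hd1, ← hdrop, ← List.tail_drop]
      · rw [hslow, htake, List.filter_append]; simp [hz]
    · rw [if_pos hz]
      have hcount : st.2 + 1 = (((A.take (n+1)).filter (fun x => x ≠ 0)).length : Int) := by
        rw [hslow, htake, List.filter_append]; simp [hz]
      by_cases hse : st.2 = (n : Int)
      · rw [if_neg (not_not_intro hse)]
        exact ⟨hlen, by rw [hd1, ← hdrop, ← List.tail_drop], hcount⟩
      · rw [if_pos hse]
        refine ⟨?_, ?_, hcount⟩
        · rw [PySem.List.length_pySetD]; exact hlen
        · -- the write is at index st.2.toNat < n, so drop (n+1) is unchanged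
          have h0 : 0 ≤ st.2 := by rw [hslow]; positivity
          rw [PySem.List.pySetD_of_nonneg st.1 A[n] h0, List.drop_set,
              if_pos (by omega : st.2.toNat < n + 1)]
          rw [hd1, ← hdrop, ← List.tail_drop]

-- ===== VERDICT (by name: the statement is the Claim_ definition above) =====
theorem remove_zeros_statble_spec : Claim_equal_remove_zeros_statble := by
  intro A _
  unfold Spec_remove_zeros_statble remove_zeros_statble remove_zeros_statble_alt
  simp only [pvStepA_eq]
  have := (pvInvA A A.length le_rfl).2.2
  simpa using this
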